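-- pv_equiv track=rewrite | github.com/unioslo/cerebrum | Cerebrum/utils/stringmatch.py | name_diff
-- ===== SOURCE A (Python) =====
-- def restricted_damarau_levenshtein(first, second):
--     """
--     Calculate the edit distance between two string using restricted damarau
--     levenshtein. Allowing deletion, insertion, substitution and transposition
--     of characters.
--     """
--     first = ' ' + first
--     second = ' ' + second
--     dist_matrix = [[0 for i in range(len(first))] for b in range(len(second))]
--
--     for i in range(len(second)):
--         dist_matrix[i][0] = i
--
--     for j in range(len(first)):
--         dist_matrix[0][j] = j
--
--     for i in range(1, len(dist_matrix)):
--         for j in range(1, len(dist_matrix[0])):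
--             possible_choices = [dist_matrix[i-1][j] + 1,           #del
--                                 dist_matrix[i][j-1] + 1]           #ins
--             if first[j] == second[i]:
--                 possible_choices.append(dist_matrix[i-1][j-1])     #equal
--             elif first[j] == second[i-1] and first[j-1] == second[i]:
--                 possible_choices.append(dist_matrix[i-2][j-2] + 1) #trans
--             else:
--                 possible_choices.append(dist_matrix[i-1][j-1] + 1) #sub
--             dist_matrix[i][j] = min(possible_choices)
--
--     return dist_matrix[-1][-1]
--
-- def name_diff(full_name1, full_name2, threshold=2):
--     """
--     Calculate the difference between two names, allowing one name to be
--     longer than the other by only checking whether all names in the shortest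
--     seem to be included in the longest.
--     e.g. name_diff('foo bar', 'foo test bar') = 0
--
--     If the total difference is larger than a given threshold after any part of
--     the name, the function will return early. Useful when only close matches
--     are interesting.
--     """
--     total_difference = 0
--     names1 = full_name1.split()
--     names2 = full_name2.split()
--     if len(names1) > len(names2):
--         names1, names2 = names2, names1
--
--     for n1 in names1:
--         best_match = (0, 5)
--         for i, n2 in enumerate(names2, 1):
--             diff = restricted_damarau_levenshtein(n1, n2)
--             if diff < best_match[1]:
--                 best_match = (i, diff)
--
--         total_difference += best_match[1]
--         names2 = names2[best_match[0]:]
--         if total_difference > threshold: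
--             break
--     return total_difference
-- ===== SOURCE B (Python) =====
-- def _rdl(first, second):
--     """Restricted Damerau-Levenshtein via top-down memoized recursion."""
--     f = ' ' + first
--     s = ' ' + second
--     memo = {}
--
--     def rec(i, j):
--         if i == 0:
--             return j
--         if j == 0:
--             return i
--         if (i, j) in memo:
--             return memo[(i, j)]
--         if f[j] == s[i]:
--             third = rec(i - 1, j - 1)
--         elif f[j] == s[i - 1] and f[j - 1] == s[i]:
--             third = rec(i - 2, j - 2) + 1
--         else:
--             third = rec(i - 1, j - 1) + 1
--         v = min(rec(i - 1, j) + 1, rec(i, j - 1) + 1, third)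
--         memo[(i, j)] = v
--         return v
--
--     return rec(len(second), len(first))
--
--
-- def _consume(names1, names2, threshold, total):
--     if not names1:
--         return total
--     best_i, best_d = 0, 5
--     for i, n2 in enumerate(names2, 1):
--         d = _rdl(names1[0], n2)
--         if d < best_d:
--             best_i, best_d = i, d
--     total += best_d
--     if total > threshold:
--         return total
--     return _consume(names1[1:], names2[best_i:], threshold, total)
--
--
-- def name_diff(full_name1, full_name2, threshold=2):
--     names1 = full_name1.split()
--     names2 = full_name2.split()
--     if len(names1) > len(names2):
--         names1, names2 = names2, names1
--     return _consume(names1, names2, threshold, 0)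
-- ===== Notes on version B (the rewrite author's own statement) =====
-- stated objective: alternative
-- what changed: The edit distance is computed by a top-down memoized recursion over prefix lengths (a dict keyed on (i, j)) instead of A's bottom-up list-of-lists matrix fill, and the greedy per-name-part matching loop with break becomes a recursive consume function.
import Mathlib
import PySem

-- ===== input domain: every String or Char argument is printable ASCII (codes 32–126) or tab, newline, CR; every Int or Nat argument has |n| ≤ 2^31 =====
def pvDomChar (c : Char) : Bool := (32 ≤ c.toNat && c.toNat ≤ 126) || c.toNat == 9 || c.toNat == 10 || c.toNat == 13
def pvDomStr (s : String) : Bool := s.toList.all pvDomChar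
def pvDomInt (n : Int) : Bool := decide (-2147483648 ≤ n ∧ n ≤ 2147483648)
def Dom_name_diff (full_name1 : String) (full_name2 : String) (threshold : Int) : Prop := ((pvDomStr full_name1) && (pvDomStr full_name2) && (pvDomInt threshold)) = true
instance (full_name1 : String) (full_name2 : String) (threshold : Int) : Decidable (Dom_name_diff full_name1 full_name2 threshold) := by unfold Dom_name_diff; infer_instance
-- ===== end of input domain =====

-- B replaces A's bottom-up list-of-lists DP for the edit distance by a top-down memoized
-- recursion, and A's break-out for-loop over name parts by a recursive consume function
-- (objective: alternative — same asymptotic cost, different decomposition).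

-- ===== PORT A =====
-- restricted_damarau_levenshtein: full (len(second)+1) × (len(first)+1) matrix, filled in place
def rdlA (first second : List Char) : Int :=
  let f := ' ' :: first
  let s := ' ' :: second
  let m0 : List (List Int) :=
    (PySem.List.pyRange 0 (s.length : Int)).map
      (fun _ => (PySem.List.pyRange 0 (f.length : Int)).map (fun _ => (0 : Int)))
  let m1 := (PySem.List.pyRange 0 (s.length : Int)).foldl
      (fun m i => PySem.List.pySetD m i (PySem.List.pySetD (PySem.List.pyGetD m i []) 0 i)) m0
  let m2 := (PySem.List.pyRange 0 (f.length : Int)).foldl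
      (fun m j => PySem.List.pySetD m 0 (PySem.List.pySetD (PySem.List.pyGetD m 0 []) j j)) m1
  let m3 := (PySem.List.pyRange 1 (m2.length : Int)).foldl
      (fun m i =>
        (PySem.List.pyRange 1 ((PySem.List.pyGetD m 0 []).length : Int)).foldl
          (fun m j =>
            let del := PySem.List.pyGetD (PySem.List.pyGetD m (i - 1) []) j 0 + 1
            let ins := PySem.List.pyGetD (PySem.List.pyGetD m i []) (j - 1) 0 + 1
            let third :=
              if PySem.List.pyGetD f j ' ' = PySem.List.pyGetD s i ' ' then
                PySem.List.pyGetD (PySem.List.pyGetD m (i - 1) []) (j - 1) 0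
              else if PySem.List.pyGetD f j ' ' = PySem.List.pyGetD s (i - 1) ' ' ∧
                        PySem.List.pyGetD f (j - 1) ' ' = PySem.List.pyGetD s i ' ' then
                PySem.List.pyGetD (PySem.List.pyGetD m (i - 2) []) (j - 2) 0 + 1
              else
                PySem.List.pyGetD (PySem.List.pyGetD m (i - 1) []) (j - 1) 0 + 1
            PySem.List.pySetD m i
              (PySem.List.pySetD (PySem.List.pyGetD m i []) j (min (min del ins) third)))
          m)
      m2
  PySem.List.pyGetD (PySem.List.pyGetD m3 (-1) []) (-1) 0

-- body of "for i, n2 in enumerate(names2, 1): …"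
def bestStepA (n1 : List Char) (best : Int × Int) (p : Int × List Char) : Int × Int :=
  let diff := rdlA n1 p.2
  if diff < best.2 then (p.1, diff) else best

-- body of "for n1 in names1: …" with the break carried as a Bool flag
def stepA (threshold : Int) (st : Bool × Int × List (List Char)) (n1 : List Char) :
    Bool × Int × List (List Char) :=
  if st.1 then st
  else
    let best := (PySem.List.enumerate st.2.2 1).foldl (bestStepA n1) ((0 : Int), (5 : Int))
    let total := st.2.1 + best.2
    (decide (total > threshold), total, PySem.List.slice st.2.2 (some best.1) none)

def name_diff (full_name1 : String) (full_name2 : String) (threshold : Int) : Int :=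
  let names1 := PySem.Chars.split₀ full_name1.toList
  let names2 := PySem.Chars.split₀ full_name2.toList
  let p := if names1.length > names2.length then (names2, names1) else (names1, names2)
  (p.1.foldl (stepA threshold) (false, (0 : Int), p.2)).2.1

-- ===== PORT B =====
-- top-down memoized recursion rec(i, j) with memo dict keyed on (i, j)
def recB (f s : List Char) (i j : Nat) (memo : PySem.Dict (Nat × Nat) Int) :
    Int × PySem.Dict (Nat × Nat) Int :=
  if i = 0 then ((j : Int), memo)
  else if j = 0 then ((i : Int), memo)
  else
    match memo.get? (i, j) with
    | some v => (v, memo)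
    | none =>
      let tp :=
        if f.getD j ' ' = s.getD i ' ' then recB f s (i - 1) (j - 1) memo
        else if f.getD j ' ' = s.getD (i - 1) ' ' ∧ f.getD (j - 1) ' ' = s.getD i ' ' then
          let t := recB f s (i - 2) (j - 2) memo
          (t.1 + 1, t.2)
        else
          let t := recB f s (i - 1) (j - 1) memo
          (t.1 + 1, t.2)
      let a := recB f s (i - 1) j tp.2
      let b := recB f s i (j - 1) a.2
      let v := min (min (a.1 + 1) (b.1 + 1)) tp.1
      (v, b.2.insert (i, j) v)
termination_by i + j
decreasing_by all_goals omega

def rdlB (first second : List Char) : Int :=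
  (recB (' ' :: first) (' ' :: second) second.length first.length PySem.Dict.empty).1

def bestStepB (n1 : List Char) (best : Int × Int) (p : Int × List Char) : Int × Int :=
  let d := rdlB n1 p.2
  if d < best.2 then (p.1, d) else best

def consumeB (names1 names2 : List (List Char)) (threshold total : Int) : Int :=
  match names1 with
  | [] => total
  | n1 :: rest =>
    let best := (PySem.List.enumerate names2 1).foldl (bestStepB n1) ((0 : Int), (5 : Int))
    let total' := total + best.2
    if total' > threshold then total'
    else consumeB rest (PySem.List.slice names2 (some best.1) none) threshold total'

def name_diff_alt (full_name1 : String) (full_name2 : String) (threshold : Int) : Int :=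
  let names1 := PySem.Chars.split₀ full_name1.toList
  let names2 := PySem.Chars.split₀ full_name2.toList
  let p := if names1.length > names2.length then (names2, names1) else (names1, names2)
  consumeB p.1 p.2 threshold 0

-- ===== PRECONDITION & SPEC =====
def Spec_name_diff (full_name1 : String) (full_name2 : String) (threshold : Int) (out : Int) : Prop := out = name_diff_alt full_name1 full_name2 threshold
instance (full_name1 : String) (full_name2 : String) (threshold : Int) (out : Int) : Decidable (Spec_name_diff full_name1 full_name2 threshold out) := by unfold Spec_name_diff; infer_instance

-- ===== CLAIM (what is proved, stated in full; the proofs are below) =====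
def Claim_equal_name_diff : Prop := ∀ (full_name1 : String) (full_name2 : String) (threshold : Int), Dom_name_diff full_name1 full_name2 threshold → Spec_name_diff full_name1 full_name2 threshold (name_diff full_name1 full_name2 threshold)

-- ===== LEMMAS AND PROOFS =====

-- the mathematical recurrence both distance computations implement
def D3 (f s : List Char) (i j : Nat) : Int :=
  if i = 0 then (j : Int)
  else if j = 0 then (i : Int)
  else
    let third :=
      if f.getD j ' ' = s.getD i ' ' then D3 f s (i - 1) (j - 1)
      else if f.getD j ' ' = s.getD (i - 1) ' ' ∧ f.getD (j - 1) ' ' = s.getD i ' ' then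
        D3 f s (i - 2) (j - 2) + 1
      else D3 f s (i - 1) (j - 1) + 1
    min (min (D3 f s (i - 1) j + 1) (D3 f s i (j - 1) + 1)) third
termination_by i + j
decreasing_by all_goals omega

lemma D3_zero_left (f s : List Char) (j : Nat) : D3 f s 0 j = (j : Int) := by
  rw [D3]; simp

lemma D3_zero_right (f s : List Char) (i : Nat) : D3 f s i 0 = (i : Int) := by
  rw [D3]; split <;> simp_all

-- ---- B side: the memoized recursion computes D3 ----

def MemoInv (f s : List Char) (memo : PySem.Dict (Nat × Nat) Int) : Prop :=
  ∀ p v, memo.get? p = some v → v = D3 f s p.1 p.2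

lemma recB_correct (f s : List Char) :
    ∀ n i j memo, i + j ≤ n → MemoInv f s memo →
      (recB f s i j memo).1 = D3 f s i j ∧ MemoInv f s (recB f s i j memo).2 := by
  intro n
  induction n with
  | zero =>
    intro i j memo hle hinv
    have hi : i = 0 := by omega
    subst hi
    rw [recB.eq_def]
    simpa [D3_zero_left] using hinv
  | succ n ih =>
    intro i j memo hle hinv
    by_cases hi : i = 0
    · subst hi
      rw [recB.eq_def]
      simpa [D3_zero_left] using hinv
    by_cases hj : j = 0
    · subst hj
      rw [recB.eq_def]
      simpa [hi, D3_zero_right] using hinv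
    rw [recB.eq_def]
    simp only [hi, hj, if_false]
    cases hm : memo.get? (i, j) with
    | some v =>
      simp only []
      exact ⟨hinv (i, j) v hm, hinv⟩
    | none =>
      simp only []
      have htp : ∀ tp : Int × PySem.Dict (Nat × Nat) Int,
          tp = (if f.getD j ' ' = s.getD i ' ' then recB f s (i - 1) (j - 1) memo
                else if f.getD j ' ' = s.getD (i - 1) ' ' ∧ f.getD (j - 1) ' ' = s.getD i ' ' then
                  ((recB f s (i - 2) (j - 2) memo).1 + 1, (recB f s (i - 2) (j - 2) memo).2)
                else ((recB f s (i - 1) (j - 1) memo).1 + 1, (recB f s (i - 1) (j - 1) memo).2)) →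
          (tp.1 = (if f.getD j ' ' = s.getD i ' ' then D3 f s (i - 1) (j - 1)
                   else if f.getD j ' ' = s.getD (i - 1) ' ' ∧ f.getD (j - 1) ' ' = s.getD i ' ' then
                     D3 f s (i - 2) (j - 2) + 1
                   else D3 f s (i - 1) (j - 1) + 1) ∧ MemoInv f s tp.2) := by
        intro tp htp
        subst htp
        split_ifs with h1 h2
        · exact ih (i - 1) (j - 1) memo (by omega) hinv
        · have := ih (i - 2) (j - 2) memo (by omega) hinv
          exact ⟨by simp [this.1], this.2⟩
        · have := ih (i - 1) (j - 1) memo (by omega) hinv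
          exact ⟨by simp [this.1], this.2⟩
      obtain ⟨htp1, htp2⟩ := htp _ rfl
      have ha := ih (i - 1) j _ (by omega) htp2
      have hb := ih i (j - 1) _ (by omega) ha.2
      constructor
      · show min (min _ _) _ = _
        rw [ha.1, hb.1, htp1]
        conv_rhs => rw [D3]
        simp only [hi, hj, if_false]
      · intro p v hv
        rw [PySem.Dict.get?_insert] at hv
        split at hv
        · rename_i hpe
          subst hpe
          have hv' := Option.some.inj hv
          rw [← hv']
          show min (min _ _) _ = _
          rw [ha.1, hb.1, htp1]
          conv_rhs => rw [D3]
          simp only [hi, hj, if_false]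
        · exact hb.2 p v hv

lemma rdlB_eq_D3 (first second : List Char) :
    rdlB first second = D3 (' ' :: first) (' ' :: second) second.length first.length := by
  have h := recB_correct (' ' :: first) (' ' :: second)
      (second.length + first.length) second.length first.length PySem.Dict.empty
      (le_refl _) (by intro p v hv; simp [PySem.Dict.get?_empty] at hv)
  exact h.1

-- ---- A side: the matrix fill computes D3 ----

def getV (m : List (List Int)) (r c : Nat) : Int := (m.getD r []).getD c 0

def Shape (lf ls : Nat) (m : List (List Int)) : Prop :=
  m.length = ls ∧ ∀ row ∈ m, row.length = lf

lemma pyRange_empty (a : Int) : PySem.List.pyRange a a = [] := by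
  cases h : PySem.List.pyRange a a with
  | nil => rfl
  | cons y ys =>
    exfalso
    have hy : y ∈ PySem.List.pyRange a a := by rw [h]; exact List.mem_cons_self
    have := PySem.List.mem_pyRange_one.mp hy
    omega

lemma foldl_pyRange_induct_aux {β : Type} (P : Int → β → Prop) (g : β → Int → β) (a : Int) :
    ∀ (n : Nat) (init : β), P a init →
      (∀ i st, a ≤ i → i < a + n → P i st → P (i + 1) (g st i)) →
      P (a + n) ((PySem.List.pyRange a (a + n)).foldl g init) := by
  intro n
  induction n with
  | zero => intro init h0 _; simpa [pyRange_empty] using h0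
  | succ k ih =>
    intro init h0 hstep
    have hsplit : PySem.List.pyRange a (a + ((k : Nat) + 1 : Nat)) =
        PySem.List.pyRange a (a + k) ++ PySem.List.pyRange (a + k) (a + ((k : Nat) + 1 : Nat)) := by
      apply PySem.List.pyRange_one_append <;> push_cast <;> omega
    have hone : PySem.List.pyRange (a + (k : Nat)) (a + ((k : Nat) + 1 : Nat)) = [a + k] := by
      rw [PySem.List.pyRange_one_cons (by push_cast; omega)]
      have h2 : PySem.List.pyRange (a + (k:Nat) + 1) (a + ((k:Nat) + 1 : Nat)) = [] := by
        have : a + (k:Nat) + 1 = a + ((k:Nat) + 1 : Nat) := by push_cast; ring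
        rw [this, pyRange_empty]
      rw [show (((k:Nat) + 1 : Nat) : Int) = ((k:Nat) : Int) + 1 from by push_cast; ring] at h2 ⊢
      simp [h2]
    rw [hsplit, hone, List.foldl_append]
    have hP := ih init h0 (fun i st h1 h2 h3 => hstep i st h1 (by push_cast at h2 ⊢; omega) h3)
    have := hstep (a + k) _ (by omega) (by push_cast; omega) hP
    simp only [List.foldl_cons, List.foldl_nil]
    have he : a + (k:Nat) + 1 = a + ((k:Nat) + 1 : Nat) := by push_cast; ring
    rw [← he]
    exact this

-- generic induction along a foldl over pyRange a b (step 1)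
lemma foldl_pyRange_induct {β : Type} (P : Int → β → Prop) (g : β → Int → β) (a b : Int)
    (init : β) (hab : a ≤ b) (h0 : P a init)
    (hstep : ∀ i st, a ≤ i → i < b → P i st → P (i + 1) (g st i)) :
    P b ((PySem.List.pyRange a b).foldl g init) := by
  obtain ⟨n, hn⟩ : ∃ n : Nat, b = a + n := ⟨(b - a).toNat, by omega⟩
  subst hn
  exact foldl_pyRange_induct_aux P g a n init h0 hstep

-- words of a '' no-space '' pair: guard of the transposition branch forces i, j ≥ 2
lemma guard_ge_two (first second : List Char) (hf : ' ' ∉ first) (hs : ' ' ∉ second)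
    (ri cj : Nat) (h1 : 1 ≤ ri) (h2 : ri < second.length + 1) (h3 : 1 ≤ cj)
    (h4 : cj < first.length + 1)
    (hg : (' ' :: first).getD cj ' ' = (' ' :: second).getD (ri - 1) ' ' ∧
          (' ' :: first).getD (cj - 1) ' ' = (' ' :: second).getD ri ' ') :
    2 ≤ ri ∧ 2 ≤ cj := by
  obtain ⟨hg1, hg2⟩ := hg
  have hfc : (' ' :: first).getD cj ' ' ∈ first := by
    cases cj with
    | zero => omega
    | succ c =>
      simp only [List.getD_cons_succ]
      rw [List.getD_eq_getElem first ' ' (by omega)]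
      exact List.getElem_mem _
  have hsc : (' ' :: second).getD ri ' ' ∈ second := by
    cases ri with
    | zero => omega
    | succ r =>
      simp only [List.getD_cons_succ]
      rw [List.getD_eq_getElem second ' ' (by omega)]
      exact List.getElem_mem _
  constructor
  · by_contra h
    have : ri = 1 := by omega
    subst this
    simp only [Nat.sub_self, List.getD_cons_zero] at hg1
    rw [hg1] at hfc
    exact hf hfc
  · by_contra h
    have : cj = 1 := by omega
    subst this
    simp only [Nat.sub_self, List.getD_cons_zero] at hg2
    rw [← hg2] at hsc
    exact hs hsc

lemma length_pyRange_nat (n : Nat) : (PySem.List.pyRange 0 (n : Int)).length = n := by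
  rw [PySem.List.pyRange_zero_natCast]; simp

lemma getD_mem_of_lt (m : List (List Int)) (r : Nat) (h : r < m.length) : m.getD r [] ∈ m := by
  rw [List.getD_eq_getElem _ _ h]; exact List.getElem_mem _

lemma shape_set (lf ls : Nat) (m : List (List Int)) (h : Shape lf ls m) (rn : Nat)
    (v : List Int) (hv : v.length = lf) : Shape lf ls (PySem.List.pySetD m (rn : Int) v) := by
  obtain ⟨h1, h2⟩ := h
  rw [PySem.List.pySetD_of_nonneg _ _ (by positivity)]
  refine ⟨by simpa using h1, ?_⟩
  intro row hrow
  rcases List.mem_or_eq_of_mem_set hrow with hx | hx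
  · exact h2 row hx
  · subst hx; exact hv

lemma getV_set (m : List (List Int)) (rn : Nat) (v : List Int) (h : rn < m.length) (r c : Nat) :
    getV (PySem.List.pySetD m (rn : Int) v) r c = if r = rn then v.getD c 0 else getV m r c := by
  unfold getV
  have h1 : (PySem.List.pySetD m (rn : Int) v).getD r [] = if r = rn then v else m.getD r [] := by
    have := PySem.List.pyGetD_pySetD_natCast m rn r v [] h
    simpa using this
  rw [h1]; split <;> rfl

lemma getD_set_row (row : List Int) (cn : Nat) (x : Int) (h : cn < row.length) (c : Nat) :
    (PySem.List.pySetD row (cn : Int) x).getD c 0 = if c = cn then x else row.getD c 0 := by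
  have := PySem.List.pyGetD_pySetD_natCast row cn c x 0 h
  simpa using this

lemma getV_set' (m : List (List Int)) (ii : Int) (h0 : 0 ≤ ii) (h : ii.toNat < m.length)
    (v : List Int) (r c : Nat) :
    getV (PySem.List.pySetD m ii v) r c = if r = ii.toNat then v.getD c 0 else getV m r c := by
  have he : ii = ((ii.toNat : Nat) : Int) := by omega
  rw [he]; exact getV_set m ii.toNat v h r c

lemma getD_set_row' (row : List Int) (ci : Int) (x : Int) (h0 : 0 ≤ ci)
    (h : ci.toNat < row.length) (c : Nat) :
    (PySem.List.pySetD row ci x).getD c 0 = if c = ci.toNat then x else row.getD c 0 := by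
  have he : ci = ((ci.toNat : Nat) : Int) := by omega
  rw [he]; exact getD_set_row row ci.toNat x h c

lemma shape_set' (lf ls : Nat) (m : List (List Int)) (h : Shape lf ls m) (ii : Int)
    (h0 : 0 ≤ ii) (v : List Int) (hv : v.length = lf) :
    Shape lf ls (PySem.List.pySetD m ii v) := by
  have he : ii = ((ii.toNat : Nat) : Int) := by omega
  rw [he]; exact shape_set lf ls m h ii.toNat v hv


lemma stage1 (lf ls : Nat) (m0 : List (List Int)) (hsh : Shape lf ls m0)
    (h0 : ∀ r c, r < ls → c < lf → getV m0 r c = 0) (hlf : 1 ≤ lf) :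
    Shape lf ls ((PySem.List.pyRange 0 (ls : Int)).foldl
        (fun m i => PySem.List.pySetD m i (PySem.List.pySetD (PySem.List.pyGetD m i []) 0 i)) m0) ∧
    ∀ r c, r < ls → c < lf →
      getV ((PySem.List.pyRange 0 (ls : Int)).foldl
        (fun m i => PySem.List.pySetD m i (PySem.List.pySetD (PySem.List.pyGetD m i []) 0 i)) m0) r c =
      if c = 0 then (r : Int) else 0 := by
  have key := foldl_pyRange_induct
    (P := fun i m => Shape lf ls m ∧ ∀ r c, r < ls → c < lf →
      getV m r c = if c = 0 ∧ (r : Int) < i then (r : Int) else 0)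
    (g := fun m i => PySem.List.pySetD m i (PySem.List.pySetD (PySem.List.pyGetD m i []) 0 i))
    0 (ls : Int) m0 (by positivity)
    ⟨hsh, fun r c hr hc => by simp [h0 r c hr hc]⟩
    ?_
  · refine ⟨key.1, fun r c hr hc => ?_⟩
    have := key.2 r c hr hc
    rw [this]
    by_cases hc0 : c = 0 <;> simp [hc0, show (r : Int) < (ls : Int) from by exact_mod_cast hr]
  · rintro i m hi1 hi2 ⟨hshm, hvals⟩
    simp only []
    have hml : m.length = ls := hshm.1
    have hie : ((i.toNat : Nat) : Int) = i := by omega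
    have hrls : i.toNat < ls := by omega
    have hrow : PySem.List.pyGetD m i [] = m.getD i.toNat [] := by
      rw [← hie]; simp only [PySem.List.pyGetD_natCast, Int.toNat_natCast]
    have hrowlen : (m.getD i.toNat []).length = lf :=
      hshm.2 _ (getD_mem_of_lt m i.toNat (by omega))
    have hnewlen : (PySem.List.pySetD (m.getD i.toNat []) 0 i).length = lf := by
      rw [PySem.List.length_pySetD]; exact hrowlen
    constructor
    · rw [hrow]
      exact shape_set' lf ls m hshm i hi1 _ hnewlen
    · intro r c hr hc
      rw [hrow, getV_set' m i hi1 (by omega) _ r c]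
      by_cases hrr : r = i.toNat
      · rw [if_pos hrr]
        rw [getD_set_row' _ 0 i (by norm_num) (by rw [Int.toNat_zero]; omega) c]
        rw [Int.toNat_zero]
        by_cases hc0 : c = 0
        · rw [if_pos hc0, if_pos ⟨hc0, by omega⟩]
          omega
        · rw [if_neg hc0]
          have hgv : (m.getD i.toNat []).getD c 0 = getV m r c := by rw [hrr]; rfl
          rw [hgv, hvals r c hr hc]
          rw [if_neg (by intro h; exact hc0 h.1), if_neg (by intro h; exact hc0 h.1)]
      · rw [if_neg hrr, hvals r c hr hc]
        by_cases hc0 : c = 0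
        · by_cases hlt : (r : Int) < i
          · rw [if_pos ⟨hc0, hlt⟩, if_pos ⟨hc0, by omega⟩]
          · rw [if_neg (by intro h; exact hlt h.2), if_neg (by intro h; omega)]
        · rw [if_neg (by intro h; exact hc0 h.1), if_neg (by intro h; exact hc0 h.1)]

def Bse (r c : Nat) : Int := if r = 0 then (c : Int) else if c = 0 then (r : Int) else 0

lemma stage2 (lf ls : Nat) (m1 : List (List Int)) (hsh : Shape lf ls m1)
    (h0 : ∀ r c, r < ls → c < lf → getV m1 r c = if c = 0 then (r : Int) else 0)
    (hls : 1 ≤ ls) :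
    Shape lf ls ((PySem.List.pyRange 0 (lf : Int)).foldl
        (fun m j => PySem.List.pySetD m 0 (PySem.List.pySetD (PySem.List.pyGetD m 0 []) j j)) m1) ∧
    ∀ r c, r < ls → c < lf →
      getV ((PySem.List.pyRange 0 (lf : Int)).foldl
        (fun m j => PySem.List.pySetD m 0 (PySem.List.pySetD (PySem.List.pyGetD m 0 []) j j)) m1) r c =
      Bse r c := by
  have key := foldl_pyRange_induct
    (P := fun j m => Shape lf ls m ∧ ∀ r c, r < ls → c < lf →
      getV m r c = if r = 0 ∧ (c : Int) < j then (c : Int) else if c = 0 then (r : Int) else 0)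
    (g := fun m j => PySem.List.pySetD m 0 (PySem.List.pySetD (PySem.List.pyGetD m 0 []) j j))
    0 (lf : Int) m1 (by positivity)
    ⟨hsh, fun r c hr hc => by
      rw [h0 r c hr hc]
      by_cases hc0 : c = 0 <;> by_cases hr0 : r = 0 <;> simp [hc0, hr0]⟩
    ?_
  · refine ⟨key.1, fun r c hr hc => ?_⟩
    rw [key.2 r c hr hc]
    unfold Bse
    by_cases hr0 : r = 0 <;>
      simp [hr0, show (c : Int) < (lf : Int) from by exact_mod_cast hc]
  · rintro j m hj1 hj2 ⟨hshm, hvals⟩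
    simp only []
    have hml : m.length = ls := hshm.1
    have hje : ((j.toNat : Nat) : Int) = j := by omega
    have hjlf : j.toNat < lf := by omega
    have hrow : PySem.List.pyGetD m 0 [] = m.getD 0 [] := PySem.List.pyGetD_zero m []
    have hrowlen : (m.getD 0 []).length = lf :=
      hshm.2 _ (getD_mem_of_lt m 0 (by omega))
    have hnewlen : (PySem.List.pySetD (m.getD 0 []) j j).length = lf := by
      rw [PySem.List.length_pySetD]; exact hrowlen
    constructor
    · rw [hrow]
      exact shape_set' lf ls m hshm 0 (by norm_num) _ hnewlen
    · intro r c hr hc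
      rw [hrow, getV_set' m 0 (by norm_num) (by rw [Int.toNat_zero]; omega) _ r c, Int.toNat_zero]
      by_cases hr0 : r = 0
      · rw [if_pos hr0]
        rw [getD_set_row' _ j j hj1 (by omega) c]
        by_cases hcj : c = j.toNat
        · rw [if_pos hcj, if_pos ⟨hr0, by omega⟩]
          omega
        · rw [if_neg hcj]
          have hgv : (m.getD 0 []).getD c 0 = getV m r c := by rw [hr0]; rfl
          rw [hgv, hvals r c hr hc]
          split_ifs <;> omega
      · rw [if_neg hr0, hvals r c hr hc]
        split_ifs <;> omega

lemma stage3 (first second : List Char) (hf : ' ' ∉ first) (hs : ' ' ∉ second)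
    (m2 : List (List Int)) (hsh : Shape (first.length + 1) (second.length + 1) m2)
    (hbase : ∀ r c, r < second.length + 1 → c < first.length + 1 → getV m2 r c = Bse r c) :
    Shape (first.length + 1) (second.length + 1)
      ((PySem.List.pyRange 1 (m2.length : Int)).foldl
        (fun m i =>
          (PySem.List.pyRange 1 ((PySem.List.pyGetD m 0 []).length : Int)).foldl
            (fun m j =>
              let del := PySem.List.pyGetD (PySem.List.pyGetD m (i - 1) []) j 0 + 1
              let ins := PySem.List.pyGetD (PySem.List.pyGetD m i []) (j - 1) 0 + 1
              let third :=
                if PySem.List.pyGetD (' ' :: first) j ' ' = PySem.List.pyGetD (' ' :: second) i ' ' then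
                  PySem.List.pyGetD (PySem.List.pyGetD m (i - 1) []) (j - 1) 0
                else if PySem.List.pyGetD (' ' :: first) j ' ' = PySem.List.pyGetD (' ' :: second) (i - 1) ' ' ∧
                          PySem.List.pyGetD (' ' :: first) (j - 1) ' ' = PySem.List.pyGetD (' ' :: second) i ' ' then
                  PySem.List.pyGetD (PySem.List.pyGetD m (i - 2) []) (j - 2) 0 + 1
                else
                  PySem.List.pyGetD (PySem.List.pyGetD m (i - 1) []) (j - 1) 0 + 1
              PySem.List.pySetD m i
                (PySem.List.pySetD (PySem.List.pyGetD m i []) j (min (min del ins) third)))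
            m)
        m2) ∧
    ∀ r c, r < second.length + 1 → c < first.length + 1 →
      getV ((PySem.List.pyRange 1 (m2.length : Int)).foldl
        (fun m i =>
          (PySem.List.pyRange 1 ((PySem.List.pyGetD m 0 []).length : Int)).foldl
            (fun m j =>
              let del := PySem.List.pyGetD (PySem.List.pyGetD m (i - 1) []) j 0 + 1
              let ins := PySem.List.pyGetD (PySem.List.pyGetD m i []) (j - 1) 0 + 1
              let third :=
                if PySem.List.pyGetD (' ' :: first) j ' ' = PySem.List.pyGetD (' ' :: second) i ' ' then
                  PySem.List.pyGetD (PySem.List.pyGetD m (i - 1) []) (j - 1) 0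
                else if PySem.List.pyGetD (' ' :: first) j ' ' = PySem.List.pyGetD (' ' :: second) (i - 1) ' ' ∧
                          PySem.List.pyGetD (' ' :: first) (j - 1) ' ' = PySem.List.pyGetD (' ' :: second) i ' ' then
                  PySem.List.pyGetD (PySem.List.pyGetD m (i - 2) []) (j - 2) 0 + 1
                else
                  PySem.List.pyGetD (PySem.List.pyGetD m (i - 1) []) (j - 1) 0 + 1
              PySem.List.pySetD m i
                (PySem.List.pySetD (PySem.List.pyGetD m i []) j (min (min del ins) third)))
            m)
        m2) r c = D3 (' ' :: first) (' ' :: second) r c := by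
  set lf := first.length + 1 with hlf
  set ls := second.length + 1 with hls
  set f := ' ' :: first with hfdef
  set s := ' ' :: second with hsdef
  have hflen : f.length = lf := by simp [hfdef, hlf]
  have hslen : s.length = ls := by simp [hsdef, hls]
  rw [hsh.1]
  have key := foldl_pyRange_induct
    (P := fun i m => Shape lf ls m ∧ ∀ r c, r < ls → c < lf →
      getV m r c = if (r : Int) < i then D3 f s r c else Bse r c)
    (g := fun m i =>
      (PySem.List.pyRange 1 ((PySem.List.pyGetD m 0 []).length : Int)).foldl
        (fun m j =>
          let del := PySem.List.pyGetD (PySem.List.pyGetD m (i - 1) []) j 0 + 1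
          let ins := PySem.List.pyGetD (PySem.List.pyGetD m i []) (j - 1) 0 + 1
          let third :=
            if PySem.List.pyGetD f j ' ' = PySem.List.pyGetD s i ' ' then
              PySem.List.pyGetD (PySem.List.pyGetD m (i - 1) []) (j - 1) 0
            else if PySem.List.pyGetD f j ' ' = PySem.List.pyGetD s (i - 1) ' ' ∧
                      PySem.List.pyGetD f (j - 1) ' ' = PySem.List.pyGetD s i ' ' then
              PySem.List.pyGetD (PySem.List.pyGetD m (i - 2) []) (j - 2) 0 + 1
            else
              PySem.List.pyGetD (PySem.List.pyGetD m (i - 1) []) (j - 1) 0 + 1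
          PySem.List.pySetD m i
            (PySem.List.pySetD (PySem.List.pyGetD m i []) j (min (min del ins) third)))
        m)
    1 (ls : Int) m2 (by exact_mod_cast Nat.one_le_iff_ne_zero.mpr (by omega))
    ⟨hsh, fun r c hr hc => by
      by_cases hr0 : (r : Int) < 1
      · have : r = 0 := by omega
        subst this
        rw [if_pos hr0, hbase 0 c (by omega) hc, D3_zero_left]
        simp [Bse]
      · rw [if_neg hr0, hbase r c hr hc]⟩
    ?_
  · refine ⟨key.1, fun r c hr hc => ?_⟩
    rw [(key.2 : ∀ r c, r < ls → c < lf → _) r c hr hc,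
        if_pos (by exact_mod_cast hr)]
  · rintro i m hi1 hi2 ⟨hshm, hvals⟩
    simp only []
    have hml : m.length = ls := hshm.1
    have hrow0len : (PySem.List.pyGetD m 0 []).length = lf := by
      rw [PySem.List.pyGetD_zero]
      exact hshm.2 _ (getD_mem_of_lt m 0 (by omega))
    rw [hrow0len]
    have key2 := foldl_pyRange_induct
      (P := fun j m' => Shape lf ls m' ∧ ∀ r c, r < ls → c < lf →
        getV m' r c = if (r : Int) < i then D3 f s r c
          else if (r : Int) = i ∧ (c : Int) < j then D3 f s r c else Bse r c)
      (g := fun m j =>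
        let del := PySem.List.pyGetD (PySem.List.pyGetD m (i - 1) []) j 0 + 1
        let ins := PySem.List.pyGetD (PySem.List.pyGetD m i []) (j - 1) 0 + 1
        let third :=
          if PySem.List.pyGetD f j ' ' = PySem.List.pyGetD s i ' ' then
            PySem.List.pyGetD (PySem.List.pyGetD m (i - 1) []) (j - 1) 0
          else if PySem.List.pyGetD f j ' ' = PySem.List.pyGetD s (i - 1) ' ' ∧
                    PySem.List.pyGetD f (j - 1) ' ' = PySem.List.pyGetD s i ' ' then
            PySem.List.pyGetD (PySem.List.pyGetD m (i - 2) []) (j - 2) 0 + 1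
          else
            PySem.List.pyGetD (PySem.List.pyGetD m (i - 1) []) (j - 1) 0 + 1
        PySem.List.pySetD m i
          (PySem.List.pySetD (PySem.List.pyGetD m i []) j (min (min del ins) third)))
      1 (lf : Int) m (by exact_mod_cast Nat.one_le_iff_ne_zero.mpr (by omega))
      ⟨hshm, fun r c hr hc => by
        rw [hvals r c hr hc]
        by_cases hlt : (r : Int) < i
        · rw [if_pos hlt, if_pos hlt]
        · rw [if_neg hlt, if_neg hlt]
          by_cases hri : (r : Int) = i ∧ (c : Int) < 1
          · have hc0 : c = 0 := by omega
            have hr0 : r ≠ 0 := by omega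
            rw [if_pos hri, hc0, D3_zero_right]
            simp [Bse, hr0]
          · rw [if_neg hri]⟩
      ?_
    · refine ⟨key2.1, fun r c hr hc => ?_⟩
      rw [key2.2 r c hr hc]
      by_cases hlt : (r : Int) < i
      · rw [if_pos hlt, if_pos (by omega)]
      · by_cases hri : (r : Int) = i
        · rw [if_neg hlt, if_pos ⟨hri, by exact_mod_cast hc⟩, if_pos (by omega)]
        · rw [if_neg hlt, if_neg (by intro h; exact hri h.1), if_neg (by omega)]
    · rintro j m' hj1 hj2 ⟨hshm', hvals'⟩
      simp only []
      have hml' : m'.length = ls := hshm'.1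
      set rn := i.toNat with hrndef
      set cn := j.toNat with hcndef
      have hie : ((rn : Nat) : Int) = i := by omega
      have hje : ((cn : Nat) : Int) = j := by omega
      have hrn1 : 1 ≤ rn := by omega
      have hcn1 : 1 ≤ cn := by omega
      have hrls : rn < ls := by omega
      have hclf : cn < lf := by omega
      have hread : ∀ (a b : Nat), PySem.List.pyGetD (PySem.List.pyGetD m' ((a : Nat) : Int) []) ((b : Nat) : Int) 0 = getV m' a b := by
        intro a b; simp [getV]
      have hi1e : ((rn : Nat) : Int) - 1 = ((rn - 1 : Nat) : Int) := by omega
      have hj1e : ((cn : Nat) : Int) - 1 = ((cn - 1 : Nat) : Int) := by omega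
      -- rewrite all Int indices into Nat casts
      rw [← hie, ← hje]
      simp only [hi1e, hj1e, PySem.List.pyGetD_natCast]
      have hdel : (m'.getD (rn - 1) []).getD cn 0 = D3 f s (rn - 1) cn := by
        show getV m' (rn - 1) cn = _
        rw [hvals' (rn - 1) cn (by omega) hclf, if_pos (by omega)]
      have hins : (m'.getD rn []).getD (cn - 1) 0 = D3 f s rn (cn - 1) := by
        show getV m' rn (cn - 1) = _
        rw [hvals' rn (cn - 1) hrls (by omega), if_neg (by omega), if_pos (by constructor <;> omega)]
      have hdiag : (m'.getD (rn - 1) []).getD (cn - 1) 0 = D3 f s (rn - 1) (cn - 1) := by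
        show getV m' (rn - 1) (cn - 1) = _
        rw [hvals' (rn - 1) (cn - 1) (by omega) (by omega), if_pos (by omega)]
      have hrowilen : (m'.getD rn []).length = lf :=
        hshm'.2 _ (getD_mem_of_lt m' rn (by omega))
      constructor
      · exact shape_set lf ls m' hshm' rn _
          (by rw [PySem.List.length_pySetD]; exact hrowilen)
      · intro r c hr hc
        rw [getV_set m' rn _ (by omega) r c]
        by_cases hrr : r = rn
        · subst hrr
          rw [if_pos rfl, getD_set_row _ cn _ (by omega) c]
          by_cases hcc : c = cn
          · subst hcc
            rw [if_pos rfl]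
            rw [hdel, hins]
            have hRHS : (if ((rn : Nat) : Int) < ((rn : Nat) : Int) then D3 f s rn cn
                else if ((rn : Nat) : Int) = ((rn : Nat) : Int) ∧ ((cn : Nat) : Int) < ((cn : Nat) : Int) + 1 then D3 f s rn cn
                else Bse rn cn) = D3 f s rn cn := by
              split_ifs <;> first | rfl | omega
            rw [hRHS]
            conv_rhs => rw [D3]
            rw [if_neg (show ¬rn = 0 by omega), if_neg (show ¬cn = 0 by omega)]
            split_ifs with h1 h2
            · rw [hdiag]
            · have hge := guard_ge_two first second hf hs rn cn hrn1 (by omega) hcn1 (by omega) ⟨h2.1, h2.2⟩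
              have h2e : ((rn : Nat) : Int) - 2 = ((rn - 2 : Nat) : Int) := by omega
              have h2f : ((cn : Nat) : Int) - 2 = ((cn - 2 : Nat) : Int) := by omega
              rw [h2e, h2f]
              simp only [PySem.List.pyGetD_natCast]
              have htrans : (m'.getD (rn - 2) []).getD (cn - 2) 0 = D3 f s (rn - 2) (cn - 2) := by
                show getV m' (rn - 2) (cn - 2) = _
                rw [hvals' (rn - 2) (cn - 2) (by omega) (by omega), if_pos (by omega)]
              rw [htrans]
            · rw [hdiag]
          · rw [if_neg hcc]
            have hgv : (m'.getD rn []).getD c 0 = getV m' rn c := rfl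
            rw [hgv, hvals' rn c hr hc]
            split_ifs <;> first | rfl | omega
        · rw [if_neg hrr]
          rw [hvals' r c hr hc]
          split_ifs <;> first | rfl | omega


lemma m0_facts (first second : List Char) :
    Shape (first.length + 1) (second.length + 1)
      ((PySem.List.pyRange 0 (((' ' :: second).length : Nat) : Int)).map
        (fun _ => (PySem.List.pyRange 0 (((' ' :: first).length : Nat) : Int)).map (fun _ => (0 : Int)))) ∧
    ∀ r c, r < second.length + 1 → c < first.length + 1 →
      getV ((PySem.List.pyRange 0 (((' ' :: second).length : Nat) : Int)).map
        (fun _ => (PySem.List.pyRange 0 (((' ' :: first).length : Nat) : Int)).map (fun _ => (0 : Int)))) r c = 0 := by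
  have hzl : ((PySem.List.pyRange 0 (((' ' :: first).length : Nat) : Int)).map (fun _ => (0 : Int))).length
      = first.length + 1 := by
    rw [List.length_map, length_pyRange_nat, List.length_cons]
  constructor
  · constructor
    · rw [List.length_map, length_pyRange_nat, List.length_cons]
    · intro row hrow
      rcases List.mem_map.mp hrow with ⟨x, _, hxe⟩
      rw [← hxe]
      exact hzl
  · intro r c hr hc
    unfold getV
    have hlen : r < ((PySem.List.pyRange 0 (((' ' :: second).length : Nat) : Int)).map
        (fun _ => (PySem.List.pyRange 0 (((' ' :: first).length : Nat) : Int)).map (fun _ => (0 : Int)))).length := by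
      rw [List.length_map, length_pyRange_nat, List.length_cons]; omega
    rw [List.getD_eq_getElem _ _ hlen, List.getElem_map]
    rw [List.getD_eq_getElem _ _ (by rw [List.length_map, length_pyRange_nat, List.length_cons]; omega),
        List.getElem_map]


lemma neg_one_read (lf ls : Nat) (m : List (List Int)) (hsh : Shape lf ls m)
    (hlf : 1 ≤ lf) (hls : 1 ≤ ls) :
    PySem.List.pyGetD (PySem.List.pyGetD m (-1) []) (-1) 0 = getV m (ls - 1) (lf - 1) := by
  have hml : m.length = ls := hsh.1
  have hne : m ≠ [] := by
    intro h
    rw [h] at hml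
    simp at hml
    omega
  rw [PySem.List.pyGetD_neg_one m [] hne]
  have hlast : m.getLast hne = m.getD (ls - 1) [] := by
    rw [List.getLast_eq_getElem, List.getD_eq_getElem _ _ (by omega)]
    congr 1
    omega
  rw [hlast]
  have hrowlen : (m.getD (ls - 1) []).length = lf :=
    hsh.2 _ (getD_mem_of_lt m (ls - 1) (by omega))
  have hrne : m.getD (ls - 1) [] ≠ [] := by
    intro h
    rw [h] at hrowlen
    simp at hrowlen
    omega
  rw [PySem.List.pyGetD_neg_one _ 0 hrne]
  unfold getV
  rw [List.getLast_eq_getElem]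
  rw [show lf - 1 = (m.getD (ls - 1) []).length - 1 from by omega]
  exact (List.getD_eq_getElem _ _ (by omega)).symm


lemma rdlA_eq_D3 (first second : List Char) (hf : ' ' ∉ first) (hs : ' ' ∉ second) :
    rdlA first second = D3 (' ' :: first) (' ' :: second) second.length first.length := by
  simp only [rdlA, List.length_cons]
  obtain ⟨hm0s, hm0v⟩ := m0_facts first second
  simp only [List.length_cons] at hm0s hm0v
  have h1 := stage1 (first.length + 1) (second.length + 1) _ hm0s hm0v (by omega)
  have h2 := stage2 (first.length + 1) (second.length + 1) _ h1.1 h1.2 (by omega)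
  have h3 := stage3 first second hf hs _ h2.1 h2.2
  rw [neg_one_read (first.length + 1) (second.length + 1) _ h3.1 (by omega) (by omega)]
  rw [h3.2 (second.length + 1 - 1) (first.length + 1 - 1) (by omega) (by omega)]
  simp


lemma rdlA_eq_rdlB (first second : List Char) (hf : ' ' ∉ first) (hs : ' ' ∉ second) :
    rdlA first second = rdlB first second := by
  rw [rdlA_eq_D3 first second hf hs, rdlB_eq_D3]

-- ---- words produced by split() contain no whitespace ----

def CleanWord (w : List Char) : Prop := ∀ c ∈ w, PySem.Chars.isspace c = false

lemma go_clean : ∀ (cs cur : List Char) (acc : List (List Char)),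
    (∀ c ∈ cur, PySem.Chars.isspace c = false) →
    (∀ u ∈ acc, ∀ c ∈ u, PySem.Chars.isspace c = false) →
    ∀ w ∈ PySem.Chars.split₀.go cs cur acc, ∀ c ∈ w, PySem.Chars.isspace c = false := by
  intro cs
  induction cs with
  | nil =>
    intro cur acc hcur hacc w hw
    simp only [PySem.Chars.split₀.go] at hw
    split at hw
    · exact hacc w (by simpa using hw)
    · rcases (by simpa using hw : w ∈ acc ∨ w = cur.reverse) with h | h
      · exact hacc w h
      · subst h; intro c hc; exact hcur c (by simpa using hc)
  | cons x rest ih =>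
    intro cur acc hcur hacc w hw
    simp only [PySem.Chars.split₀.go] at hw
    split at hw
    · split at hw
      · exact ih [] acc (by simp) hacc w hw
      · refine ih [] (cur.reverse :: acc) (by simp) ?_ w hw
        intro u hu
        rcases List.mem_cons.mp hu with h | h
        · subst h; intro c hc; exact hcur c (by simpa using hc)
        · exact hacc u h
    · refine ih (x :: cur) acc ?_ hacc w hw
      intro c hc
      rcases List.mem_cons.mp hc with h | h
      · subst h; simp_all
      · exact hcur c h

lemma split₀_clean (cs : List Char) : ∀ w ∈ PySem.Chars.split₀ cs, CleanWord w := by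
  intro w hw
  exact go_clean cs [] [] (by simp) (by simp) w hw

lemma clean_no_space {w : List Char} (h : CleanWord w) : ' ' ∉ w := by
  intro hmem
  have := h ' ' hmem
  simp [PySem.Chars.isspace] at this

-- ---- outer loops agree ----

lemma snd_mem_enumerate {α : Type} : ∀ (xs : List α) (s : Int) (p : Int × α),
    p ∈ PySem.List.enumerate xs s → p.2 ∈ xs := by
  intro xs
  induction xs with
  | nil => intro s p h; simp [PySem.List.enumerate] at h
  | cons x t ih =>
    intro s p h
    rw [show PySem.List.enumerate (x :: t) s = (s, x) :: PySem.List.enumerate t (s + 1) from rfl] at h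
    rcases List.mem_cons.mp h with h | h
    · subst h; exact List.mem_cons_self
    · exact List.mem_cons_of_mem _ (ih (s + 1) p h)

lemma bestfold_eq (n1 : List Char) (h1 : ' ' ∉ n1) (ns2 : List (List Char))
    (h2 : ∀ w ∈ ns2, CleanWord w) (st : Int) :
    (PySem.List.enumerate ns2 st).foldl (bestStepA n1) ((0 : Int), (5 : Int)) =
      (PySem.List.enumerate ns2 st).foldl (bestStepB n1) ((0 : Int), (5 : Int)) := by
  apply PySem.List.foldl_congr_mem
  intro acc p hp
  have hpmem := snd_mem_enumerate ns2 st p hp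
  unfold bestStepA bestStepB
  rw [rdlA_eq_rdlB n1 p.2 h1 (clean_no_space (h2 p.2 hpmem))]

lemma stepA_done (threshold : Int) :
    ∀ (l : List (List Char)) (st : Bool × Int × List (List Char)), st.1 = true →
      l.foldl (stepA threshold) st = st := by
  intro l
  induction l with
  | nil => intro st h; rfl
  | cons x xs ih =>
    intro st h
    simp only [List.foldl_cons, stepA, h, if_pos]
    exact ih st h

lemma consume_eq (threshold : Int) :
    ∀ (names1 ns2 : List (List Char)) (total : Int),
      (∀ w ∈ names1, CleanWord w) → (∀ w ∈ ns2, CleanWord w) →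
      (names1.foldl (stepA threshold) (false, total, ns2)).2.1 =
        consumeB names1 ns2 threshold total := by
  intro names1
  induction names1 with
  | nil => intro ns2 total h1 h2; rfl
  | cons n1 rest ih =>
    intro ns2 total h1 h2
    have hbest := bestfold_eq n1 (clean_no_space (h1 n1 List.mem_cons_self)) ns2 h2 1
    simp only [List.foldl_cons, consumeB, stepA, Bool.false_eq_true, if_false, hbest]
    by_cases hgt : total + ((PySem.List.enumerate ns2 1).foldl (bestStepB n1) ((0:Int),(5:Int))).2 > threshold
    · rw [if_pos hgt]
      have : (decide (total + ((PySem.List.enumerate ns2 1).foldl (bestStepB n1) ((0:Int),(5:Int))).2 > threshold)) = true := by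
        simpa using hgt
      rw [this, stepA_done threshold rest _ rfl]
    · rw [if_neg hgt]
      have hd : (decide (total + ((PySem.List.enumerate ns2 1).foldl (bestStepB n1) ((0:Int),(5:Int))).2 > threshold)) = false := by
        simpa using hgt
      rw [hd]
      refine ih _ _ (fun w hw => h1 w (List.mem_cons_of_mem _ hw)) ?_
      intro w hw
      exact h2 w (PySem.List.mem_of_mem_slice _ _ _ hw)

lemma clean_of_split₀ (s : String) : ∀ w ∈ PySem.Chars.split₀ s.toList, CleanWord w :=
  split₀_clean s.toList

-- ===== VERDICT (by name: the statement is the Claim_ definition above) =====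
theorem name_diff_spec : Claim_equal_name_diff := by
  intro full_name1 full_name2 threshold _
  unfold Spec_name_diff name_diff name_diff_alt
  have c1 := clean_of_split₀ full_name1
  have c2 := clean_of_split₀ full_name2
  by_cases h : (PySem.Chars.split₀ full_name1.toList).length >
      (PySem.Chars.split₀ full_name2.toList).length <;>
    simp only [h, if_pos, if_neg, not_false_iff] <;>
    [exact consume_eq threshold _ _ 0 c2 c1; exact consume_eq threshold _ _ 0 c1 c2]
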